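-- pv_equiv track=rewrite | github.com/edobobo/fondamenti-di-informatica-2024 | lezione-24052024/Esame/DistribuzioneB/Eserc2/B_Ex2.py | B_Ex2
-- ===== SOURCE A (Python) =====
-- def B_Ex2(m):
--     if len(m) == 0 or len(m) != len(m[0]):
--         return []
--
--     nuova_matrice = []
--     for i in range(len(m)):
--         riga_corrente = m[i]
--         nuova_riga = []
--         for j in range(len(riga_corrente)):
--             if j < i:
--                 nuova_riga.append(0)
--             else:
--                 nuova_riga.append(riga_corrente[j])
--         nuova_matrice.append(nuova_riga)
--     return nuova_matrice
-- ===== SOURCE B (Python) =====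
-- def B_Ex2(m):
--     if len(m) == 0 or len(m) != len(m[0]):
--         return []
--     return [[0] * min(i, len(row)) + row[i:] for i, row in enumerate(m)]
-- ===== Notes on version B (the rewrite author's own statement) =====
-- stated objective: simpler
-- what changed: Replaces the element-by-element inner loop with a j<i branch by bulk row assembly: each output row is [0]*min(i,len(row)) concatenated with the slice row[i:], built in a single comprehension over enumerate(m).
import Mathlib
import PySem

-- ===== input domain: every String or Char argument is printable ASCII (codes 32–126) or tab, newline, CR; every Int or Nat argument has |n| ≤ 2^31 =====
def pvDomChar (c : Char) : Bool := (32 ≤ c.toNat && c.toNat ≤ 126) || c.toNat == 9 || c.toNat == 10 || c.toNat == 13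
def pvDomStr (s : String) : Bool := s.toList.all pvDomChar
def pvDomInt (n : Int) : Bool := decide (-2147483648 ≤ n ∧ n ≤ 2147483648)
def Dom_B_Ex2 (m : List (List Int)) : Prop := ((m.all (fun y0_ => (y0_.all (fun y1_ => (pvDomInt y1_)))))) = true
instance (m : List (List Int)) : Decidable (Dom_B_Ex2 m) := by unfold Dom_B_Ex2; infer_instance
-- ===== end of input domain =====

-- B replaces the inner element loop (append 0 or the entry depending on j<i) by bulk row
-- assembly: [0]*min(i,len(row)) ++ row[i:], mapped over enumerate(m). Objective: simpler.


-- ===== PORT A =====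
def B_Ex2 (m : List (List Int)) : List (List Int) :=
  match m with
  | [] => []
  | r0 :: _ =>
    if m.length ≠ r0.length then []
    else
      (List.range m.length).foldl (fun nuova_matrice i =>
        let riga_corrente := m.getD i []
        let nuova_riga := (List.range riga_corrente.length).foldl (fun nr j =>
          nr ++ [if j < i then (0 : Int) else riga_corrente.getD j 0]) []
        nuova_matrice ++ [nuova_riga]) []

-- ===== PORT B =====
def B_Ex2_alt (m : List (List Int)) : List (List Int) :=
  match m with
  | [] => []
  | r0 :: _ =>
    if m.length ≠ r0.length then []
    else
      (PySem.List.enumerate m 0).map (fun p =>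
        List.replicate (min p.1.toNat p.2.length) 0 ++ PySem.List.slice p.2 (some p.1) none)

-- ===== PRECONDITION & SPEC =====
def Spec_B_Ex2 (m : List (List Int)) (out : List (List Int)) : Prop := out = B_Ex2_alt m
instance (m : List (List Int)) (out : List (List Int)) : Decidable (Spec_B_Ex2 m out) := by unfold Spec_B_Ex2; infer_instance

-- ===== CLAIM (what is proved, stated in full; the proofs are below) =====
def Claim_equal_B_Ex2 : Prop := ∀ (m : List (List Int)), Dom_B_Ex2 m → Spec_B_Ex2 m (B_Ex2 m)

-- ===== LEMMAS AND PROOFS =====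

-- a foldl that only appends singletons is a map
theorem foldl_app_singleton_eq_map {α β : Type} (l : List α) (h : α → β) (init : List β) :
    l.foldl (fun acc i => acc ++ [h i]) init = init ++ l.map h := by
  induction l generalizing init with
  | nil => simp
  | cons a t ih => simp [List.foldl_cons, ih]

-- A's inner loop over one row equals B's bulk row
theorem row_eq (riga : List Int) (i : Nat) :
    (List.range riga.length).map (fun j => if j < i then (0 : Int) else riga.getD j 0)
      = List.replicate (min i riga.length) 0 ++ riga.drop i := by
  induction riga generalizing i with
  | nil => simp
  | cons a t ih =>
    cases i with
    | zero =>
      simp only [Nat.zero_min, List.replicate, List.drop_zero, List.nil_append]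
      simp [List.range_succ_eq_map, List.map_map]
      have := ih 0
      simpa using this
    | succ i =>
      simp only [List.length_cons, List.range_succ_eq_map, List.map_cons, List.map_map]
      have h1 : ((fun j => if j < i + 1 then (0 : Int) else (a :: t).getD j 0) ∘ (· + 1))
          = fun j => if j < i then (0 : Int) else t.getD j 0 := by
        funext j; simp [Function.comp]
      rw [h1, ih i]
      simp [Nat.succ_min_succ, List.replicate_succ]

theorem B_Ex2_eq_alt (m : List (List Int)) : B_Ex2 m = B_Ex2_alt m := by
  unfold B_Ex2 B_Ex2_alt
  cases m with
  | nil => rfl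
  | cons r0 rest =>
    dsimp only
    by_cases hlen : (r0 :: rest).length ≠ r0.length
    · rw [if_pos hlen, if_pos hlen]
    · rw [if_neg hlen, if_neg hlen]
      set m := r0 :: rest
      rw [foldl_app_singleton_eq_map, List.nil_append]
      apply List.ext_getElem
      · simp [PySem.List.length_enumerate]
      · intro i h1 h2
        simp only [List.getElem_map, List.getElem_range,
          PySem.List.getElem_enumerate]
        have hi : i < m.length := by simpa using h1
        rw [List.getD_eq_getElem m [] hi]
        rw [foldl_app_singleton_eq_map, List.nil_append, row_eq]
        have : ((0 : Int) + ↑i).toNat = i := by omega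
        rw [this]
        congr 1
        have h0 : ((0 : Int) + ↑i) = ((i : Nat) : Int) := by omega
        rw [h0, PySem.List.slice_from_natCast]

-- ===== VERDICT (by name: the statement is the Claim_ definition above) =====
theorem B_Ex2_spec : Claim_equal_B_Ex2 := by
  intro m _
  unfold Spec_B_Ex2
  exact B_Ex2_eq_alt m
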